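-- pv_equiv track=rewrite | github.com/nanduapana/Financial-AI | UI APP/app.py | count_sentiment
-- ===== SOURCE A (Python) =====
-- def count_sentiment(stock_data):
--     # Initialize counters
--     total_sentiments = 0
--     positive_sentiments = 0
--     negative_sentiments = 0
--     neutral_sentiments = 0
--
--     # Check if stock data is not None before counting sentiments
--     if stock_data:
--         # Loop through the articles
--         for article in stock_data:
--             sentiment = article['Sentiment']
--             total_sentiments += 1  # Increment total sentiment count
--             if sentiment == 'POSITIVE':
--                 positive_sentiments += 1
--             elif sentiment == 'NEGATIVE':
--                 negative_sentiments += 1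
--             elif sentiment == 'NEUTRAL':
--                 neutral_sentiments += 1
--
--     return total_sentiments, positive_sentiments, negative_sentiments, neutral_sentiments
-- ===== SOURCE B (Python) =====
-- def count_sentiment(stock_data):
--     # One comprehension collects the sentiment strings (same truthiness guard as A),
--     # then the tuple is four direct queries: length plus three list.count passes.
--     sentiments = [article['Sentiment'] for article in stock_data] if stock_data else []
--     return (len(sentiments),
--             sentiments.count('POSITIVE'),
--             sentiments.count('NEGATIVE'),
--             sentiments.count('NEUTRAL'))
-- ===== Notes on version B (the rewrite author's own statement) =====
-- stated objective: idiomatic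
-- what changed: Replaces the single accumulator loop with its if/elif ladder by one comprehension extracting the sentiment strings followed by len and three list.count queries.
import Mathlib
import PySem

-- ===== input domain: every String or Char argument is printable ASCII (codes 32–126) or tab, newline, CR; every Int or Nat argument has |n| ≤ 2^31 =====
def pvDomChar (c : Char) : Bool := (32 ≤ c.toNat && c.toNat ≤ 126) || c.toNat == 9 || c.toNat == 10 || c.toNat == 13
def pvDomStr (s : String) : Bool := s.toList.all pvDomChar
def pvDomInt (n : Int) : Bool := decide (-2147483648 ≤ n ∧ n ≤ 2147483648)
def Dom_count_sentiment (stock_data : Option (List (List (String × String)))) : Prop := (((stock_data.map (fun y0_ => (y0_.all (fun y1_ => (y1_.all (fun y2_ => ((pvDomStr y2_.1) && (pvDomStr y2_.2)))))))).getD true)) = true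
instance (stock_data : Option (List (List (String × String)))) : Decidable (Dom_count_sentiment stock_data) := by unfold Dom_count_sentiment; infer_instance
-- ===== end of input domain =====

-- B replaces A's single accumulator loop with its if/elif ladder by a comprehension of the
-- sentiment strings followed by len and three list.count queries (idiomatic; same cost).

-- ===== PORT A =====
-- 'if stock_data:' is falsy for None and for []; folding over [] is exactly the skipped loop.
def count_sentiment (stock_data : Option (List (List (String × String)))) : Int × Int × Int × Int :=
  let l := match stock_data with | none => [] | some xs => xs
  l.foldl (fun (st : Int × Int × Int × Int) article =>
    let sentiment := (PySem.Dict.mk article).getD "Sentiment" ""  -- KeyError excluded by Pre_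
    let (t, p, n, u) := st
    let t := t + 1
    if sentiment = "POSITIVE" then (t, p + 1, n, u)
    else if sentiment = "NEGATIVE" then (t, p, n + 1, u)
    else if sentiment = "NEUTRAL" then (t, p, n, u + 1)
    else (t, p, n, u)) (0, 0, 0, 0)

-- ===== PORT B =====
def count_sentiment_alt (stock_data : Option (List (List (String × String)))) : Int × Int × Int × Int :=
  let sentiments := (match stock_data with | none => [] | some xs => xs).map
    (fun article => (PySem.Dict.mk article).getD "Sentiment" "")  -- the comprehension; None/[] (falsy) give []
  ((sentiments.length : Int),
   PySem.List.count sentiments "POSITIVE",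
   PySem.List.count sentiments "NEGATIVE",
   PySem.List.count sentiments "NEUTRAL")

-- ===== PRECONDITION & SPEC =====
-- Pre_ excludes exactly the inputs on which Python A (and B) raise KeyError: an article without the key 'Sentiment'.
def Pre_count_sentiment (stock_data : Option (List (List (String × String)))) : Prop :=
  ∀ article ∈ stock_data.getD [], (PySem.Dict.mk article).contains "Sentiment" = true
instance (stock_data : Option (List (List (String × String)))) : Decidable (Pre_count_sentiment stock_data) := by unfold Pre_count_sentiment; infer_instance
def pvWitness_count_sentiment : (Option (List (List (String × String)))) :=
  some [[("Sentiment", "POSITIVE")], [("Sentiment", "ODD")]]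

def Spec_count_sentiment (stock_data : Option (List (List (String × String)))) (out : Int × Int × Int × Int) : Prop := out = count_sentiment_alt stock_data
instance (stock_data : Option (List (List (String × String)))) (out : Int × Int × Int × Int) : Decidable (Spec_count_sentiment stock_data out) := by unfold Spec_count_sentiment; infer_instance

-- ===== CLAIM (what is proved, stated in full; the proofs are below) =====
def Claim_equal_count_sentiment : Prop := ∀ (stock_data : Option (List (List (String × String)))), Dom_count_sentiment stock_data → Pre_count_sentiment stock_data → Spec_count_sentiment stock_data (count_sentiment stock_data)

-- ===== LEMMAS AND PROOFS =====

-- A's loop invariant: from (t, p, n, u) the fold adds the article count and the three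
-- sentiment counts of the extracted sentiment list.
theorem count_sentiment_loop (xs : List (List (String × String))) (t p n u : Int) :
    xs.foldl (fun (st : Int × Int × Int × Int) article =>
      let sentiment := (PySem.Dict.mk article).getD "Sentiment" ""
      let (t, p, n, u) := st
      let t := t + 1
      if sentiment = "POSITIVE" then (t, p + 1, n, u)
      else if sentiment = "NEGATIVE" then (t, p, n + 1, u)
      else if sentiment = "NEUTRAL" then (t, p, n, u + 1)
      else (t, p, n, u)) (t, p, n, u)
    = (t + xs.length,
       p + (xs.map (fun a => (PySem.Dict.mk a).getD "Sentiment" "")).count "POSITIVE",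
       n + (xs.map (fun a => (PySem.Dict.mk a).getD "Sentiment" "")).count "NEGATIVE",
       u + (xs.map (fun a => (PySem.Dict.mk a).getD "Sentiment" "")).count "NEUTRAL") := by
  induction xs generalizing t p n u with
  | nil => simp
  | cons x xs ih =>
    simp only [List.foldl_cons, List.length_cons, List.map_cons, List.count_cons]
    split_ifs <;> simp_all <;> omega

-- ===== VERDICT (by name: the statement is the Claim_ definition above) =====
theorem count_sentiment_spec : Claim_equal_count_sentiment := by
  intro sd _ _
  unfold Spec_count_sentiment count_sentiment count_sentiment_alt
  cases sd with
  | none => decide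
  | some xs =>
    simp only [count_sentiment_loop, PySem.List.count_eq]
    simp
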